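-- pv_equiv track=rewrite | github.com/zhengqingquan/GateWayTool | Gateway_Tool/pyt/src/DBCParseModule/GenTool.py | DBCMotorolaStartBitShift
-- ===== SOURCE A (Python) =====
-- def DBCMotorolaStartBitShift(StartBit: int, Length: int):
--     """
--     大端模式的开始位进行转换
--     dbc文件在摩托罗拉格式下开始位的设计不一致，因此需要使用该方法进行转换
--     在dbc文件中，计算的均为msb位的下标。但显示的为lsb。
--     根据msb计算lsb
--     """
--     # 信号开始位取余，表示该信号的开始位在当前字节的比特位。若其长度不够放，表示该信号需要至少两个字节来承载。
--     if StartBit % 8 >= Length - 1: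
--         StartBit = StartBit - Length + 1
--     else:
--         for i in range(Length - 1):
--             StartBit = StartBit - 1
--             if StartBit % 8 == 7:
--                 StartBit = StartBit + 16
--     return StartBit
-- ===== SOURCE B (Python) =====
-- def DBCMotorolaStartBitShift(StartBit: int, Length: int):
--     # O(1) closed form: subtract the bit span and add 16 per byte boundary crossed.
--     r = StartBit % 8
--     if r >= Length - 1:
--         return StartBit - Length + 1
--     return StartBit - Length + 1 + 16 * ((Length - 2 - r) // 8 + 1)
-- ===== Notes on version B (the rewrite author's own statement) =====
-- stated objective: faster
-- what changed: Replaced A's per-bit loop (Length-1 iterations, adding 16 at each byte boundary) with a closed-form formula that counts byte-boundary crossings arithmetically with one floor division.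
import Mathlib
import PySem

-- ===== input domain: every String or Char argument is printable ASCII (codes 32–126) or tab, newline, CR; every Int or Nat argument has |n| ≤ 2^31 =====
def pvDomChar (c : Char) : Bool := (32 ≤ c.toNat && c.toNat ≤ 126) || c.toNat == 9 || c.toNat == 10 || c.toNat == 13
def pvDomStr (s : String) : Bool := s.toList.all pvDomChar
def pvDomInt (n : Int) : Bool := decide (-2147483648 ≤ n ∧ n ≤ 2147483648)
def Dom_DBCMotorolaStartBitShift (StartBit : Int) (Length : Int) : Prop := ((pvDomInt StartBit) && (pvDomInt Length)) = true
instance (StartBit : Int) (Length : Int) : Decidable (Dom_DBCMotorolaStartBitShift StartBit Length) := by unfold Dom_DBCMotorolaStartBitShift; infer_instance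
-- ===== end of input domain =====

-- B replaces A's per-bit loop by an O(1) closed form (count the byte-boundary crossings arithmetically).

-- ===== PORT A =====
def DBCMotorolaStartBitShift (StartBit : Int) (Length : Int) : Int :=
  if PySem.Int.mod StartBit 8 ≥ Length - 1 then
    StartBit - Length + 1
  else
    (PySem.List.pyRange 0 (Length - 1) 1).foldl
      (fun s _ =>
        let s1 := s - 1
        if PySem.Int.mod s1 8 = 7 then s1 + 16 else s1) StartBit

-- ===== PORT B =====
def DBCMotorolaStartBitShift_alt (StartBit : Int) (Length : Int) : Int :=
  let r := PySem.Int.mod StartBit 8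
  if r ≥ Length - 1 then
    StartBit - Length + 1
  else
    StartBit - Length + 1 + 16 * (PySem.Int.floordiv (Length - 2 - r) 8 + 1)

-- ===== PRECONDITION & SPEC =====
def Spec_DBCMotorolaStartBitShift (StartBit : Int) (Length : Int) (out : Int) : Prop := out = DBCMotorolaStartBitShift_alt StartBit Length
instance (StartBit : Int) (Length : Int) (out : Int) : Decidable (Spec_DBCMotorolaStartBitShift StartBit Length out) := by unfold Spec_DBCMotorolaStartBitShift; infer_instance

-- ===== CLAIM (what is proved, stated in full; the proofs are below) =====
def Claim_equal_DBCMotorolaStartBitShift : Prop := ∀ (StartBit : Int) (Length : Int), Dom_DBCMotorolaStartBitShift StartBit Length → Spec_DBCMotorolaStartBitShift StartBit Length (DBCMotorolaStartBitShift StartBit Length)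

-- ===== LEMMAS AND PROOFS =====

-- Closed form of A's loop: after n iterations starting at s, the value is
-- s - n + 16 * (number of byte-boundary crossings), the count being (n - s%8 + 7) / 8.
theorem pvLoop_closed (s : Int) (n : Nat) :
    (List.range n).foldl
      (fun x _ =>
        let x1 := x - 1
        if PySem.Int.mod x1 8 = 7 then x1 + 16 else x1) s
    = s - n + 16 * ((n - s % 8 + 7) / 8) := by
  induction n with
  | zero =>
      simp only [List.range_zero, List.foldl_nil, Nat.cast_zero]
      have h := Int.emod_nonneg s (by norm_num : (8:Int) ≠ 0)
      have h2 := Int.emod_lt_of_pos s (by norm_num : (0:Int) < 8)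
      omega
  | succ n ih =>
      rw [List.range_succ, List.foldl_append, ih]
      simp only [List.foldl_cons, List.foldl_nil]
      rw [PySem.Int.mod_eq_emod_of_pos (by norm_num : (0:Int) < 8)]
      have hmod : (s - ↑n + 16 * ((↑n - s % 8 + 7) / 8) - 1) % 8 = (s - ↑n - 1) % 8 := by
        omega
      rw [hmod]
      split_ifs with h
      · have hs8 := Int.emod_nonneg s (by norm_num : (8:Int) ≠ 0)
        have hs8' := Int.emod_lt_of_pos s (by norm_num : (0:Int) < 8)
        push_cast
        omega
      · have hs8 := Int.emod_nonneg s (by norm_num : (8:Int) ≠ 0)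
        have hs8' := Int.emod_lt_of_pos s (by norm_num : (0:Int) < 8)
        push_cast
        omega

-- ===== VERDICT (by name: the statement is the Claim_ definition above) =====
theorem DBCMotorolaStartBitShift_spec : Claim_equal_DBCMotorolaStartBitShift := by
  intro StartBit Length _
  unfold Spec_DBCMotorolaStartBitShift DBCMotorolaStartBitShift DBCMotorolaStartBitShift_alt
  by_cases hbr : PySem.Int.mod StartBit 8 ≥ Length - 1
  · rw [PySem.Int.mod_eq_emod_of_pos (by norm_num : (0:Int) < 8)] at hbr
    have h' : Length ≤ StartBit % 8 + 1 := by omega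
    simp [h']
  · rw [if_neg hbr, if_neg hbr, PySem.List.pyRange_one, List.foldl_map, pvLoop_closed]
    rw [PySem.Int.mod_eq_emod_of_pos (by norm_num : (0:Int) < 8)] at hbr ⊢
    rw [PySem.Int.floordiv_eq_ediv_of_pos (by norm_num : (0:Int) < 8)]
    have hs8 := Int.emod_nonneg StartBit (by norm_num : (8:Int) ≠ 0)
    have hn : ((Length - 1 - 0).toNat : Int) = Length - 1 := by omega
    rw [hn]
    omega
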